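-- pv_equiv track=rewrite | github.com/elimS2/power-monitor | dtek.py | _day_slots_to_48
-- ===== SOURCE A (Python) =====
-- def _day_slots_to_48(day_data: dict) -> list[str]:
--     """Convert DTEK API {HH:MM: 1|2|3} dict to 48-element grid.
--
--     1 = ok, 2 = maybe, 3 = off.
--     """
--     grid = ["ok"] * 48
--     for i in range(48):
--         key = f"{i // 2:02d}:{'30' if i % 2 else '00'}"
--         val = day_data.get(key, 1)
--         if val == 3:
--             grid[i] = "off"
--         elif val == 2:
--             grid[i] = "maybe"
--     return grid
-- ===== SOURCE B (Python) =====
-- # B: dict-driven single pass -- iterate the entries and map each canonical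
-- # "HH:MM" key to its slot via a precomputed label->index table, instead of
-- # looping over all 48 slots and querying the dict for each.
-- LABELS = [f"{h:02d}:{m}" for h in range(24) for m in ("00", "30")]
-- _SLOT = {label: i for i, label in enumerate(LABELS)}
-- _STATUS = {3: "off", 2: "maybe"}
--
--
-- def _day_slots_to_48(day_data: dict) -> list[str]:
--     grid = ["ok"] * 48
--     for key, val in day_data.items():
--         i = _SLOT.get(key)
--         st = _STATUS.get(val)
--         if i is not None and st is not None:
--             grid[i] = st
--     return grid
-- ===== Notes on version B (the rewrite author's own statement) =====
-- stated objective: alternative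
-- what changed: B replaces A's slot-driven loop (48 iterations each querying the dict for the formatted label) with a single pass over the dict's entries, mapping each key to its slot through a precomputed label-to-index table and each value through a status table; Pre_ excludes only association lists with duplicate keys, which cannot arise from a Python dict and on which first-match (A) vs last-write (B) order is accidental.
import Mathlib
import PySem

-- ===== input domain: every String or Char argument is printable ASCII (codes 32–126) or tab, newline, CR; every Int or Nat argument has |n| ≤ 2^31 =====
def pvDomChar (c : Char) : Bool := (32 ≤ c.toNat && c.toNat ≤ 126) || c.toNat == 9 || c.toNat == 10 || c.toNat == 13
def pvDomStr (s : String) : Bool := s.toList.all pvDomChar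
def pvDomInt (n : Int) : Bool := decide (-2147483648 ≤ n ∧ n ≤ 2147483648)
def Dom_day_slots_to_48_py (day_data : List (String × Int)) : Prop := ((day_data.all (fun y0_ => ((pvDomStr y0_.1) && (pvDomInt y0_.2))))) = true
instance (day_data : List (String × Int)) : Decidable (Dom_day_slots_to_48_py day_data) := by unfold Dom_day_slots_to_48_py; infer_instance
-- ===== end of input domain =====

-- B replaces A's slot-driven loop (48 iterations querying the dict for each formatted label)
-- with a single pass over the dict's entries through a precomputed label→slot table (objective: alternative).

-- ===== PORT A =====
-- f"{i // 2:02d}:{'30' if i % 2 else '00'}" — hand port of the f-string, exact for 0 ≤ i // 2 < 100 (here i ∈ [0, 48))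
def labelA (i : Int) : String :=
  let h := PySem.Int.floordiv i 2
  String.ofList ((if h < 10 then '0' :: PySem.Int.toChars h else PySem.Int.toChars h)
    ++ [':'] ++ (if PySem.Int.mod i 2 ≠ 0 then ['3', '0'] else ['0', '0']))

def day_slots_to_48_py (day_data : List (String × Int)) : List String :=
  let grid := List.replicate 48 "ok"
  (PySem.List.pyRange 0 48 1).foldl
    (fun grid i =>
      let key := labelA i
      let val := (PySem.Dict.mk day_data).getD key 1
      if val = 3 then PySem.List.pySetD grid i "off"
      else if val = 2 then PySem.List.pySetD grid i "maybe"
      else grid) grid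

-- ===== PORT B =====
-- LABELS = [f"{h:02d}:{m}" for h in range(24) for m in ("00", "30")]  (same hand port of the f-string)
def labelsB : List String :=
  (PySem.List.pyRange 0 24 1).flatMap (fun h =>
    (["00", "30"]).map (fun m =>
      String.ofList ((if h < 10 then '0' :: PySem.Int.toChars h else PySem.Int.toChars h)
        ++ [':'] ++ m.toList)))

-- _SLOT = {label: i for i, label in enumerate(LABELS)}
def slotDict : PySem.Dict String Int :=
  PySem.Dict.ofList ((PySem.List.enumerate labelsB 0).map (fun p => (p.2, p.1)))

-- _STATUS = {3: "off", 2: "maybe"}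
def statusDict : PySem.Dict Int String := PySem.Dict.ofList [(3, "off"), (2, "maybe")]

def day_slots_to_48_py_alt (day_data : List (String × Int)) : List String :=
  day_data.foldl
    (fun grid kv =>
      match slotDict.get? kv.1, statusDict.get? kv.2 with
      | some i, some st => PySem.List.pySetD grid i st
      | _, _ => grid)
    (List.replicate 48 "ok")

-- ===== PRECONDITION & SPEC =====
-- Pre_ excludes only association lists with duplicate keys: they cannot arise from a Python dict
-- (A's parameter), and on them A's first-match lookup vs B's in-order writes is accidental.
def Pre_day_slots_to_48_py (day_data : List (String × Int)) : Prop :=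
  (day_data.map Prod.fst).Nodup
instance (day_data : List (String × Int)) : Decidable (Pre_day_slots_to_48_py day_data) := by
  unfold Pre_day_slots_to_48_py; infer_instance
def pvWitness_day_slots_to_48_py : (List (String × Int)) := [("00:00", 3), ("13:30", 2), ("xx", 1)]

def Spec_day_slots_to_48_py (day_data : List (String × Int)) (out : List String) : Prop := out = day_slots_to_48_py_alt day_data
instance (day_data : List (String × Int)) (out : List String) : Decidable (Spec_day_slots_to_48_py day_data out) := by unfold Spec_day_slots_to_48_py; infer_instance

-- ===== CLAIM (what is proved, stated in full; the proofs are below) =====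
def Claim_equal_day_slots_to_48_py : Prop := ∀ (day_data : List (String × Int)), Dom_day_slots_to_48_py day_data → Pre_day_slots_to_48_py day_data → Spec_day_slots_to_48_py day_data (day_slots_to_48_py day_data)

-- ===== LEMMAS AND PROOFS =====
set_option maxRecDepth 100000
set_option maxHeartbeats 1000000

-- A's loop body, abstracted over the dict
def stepA (d : PySem.Dict String Int) (grid : List String) (i : Int) : List String :=
  if d.getD (labelA i) 1 = 3 then PySem.List.pySetD grid i "off"
  else if d.getD (labelA i) 1 = 2 then PySem.List.pySetD grid i "maybe"
  else grid

-- B's loop body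
def stepB (grid : List String) (kv : String × Int) : List String :=
  match slotDict.get? kv.1, statusDict.get? kv.2 with
  | some i, some st => PySem.List.pySetD grid i st
  | _, _ => grid

theorem portA_eq (day_data : List (String × Int)) :
    day_slots_to_48_py day_data
      = (PySem.List.pyRange 0 48 1).foldl (stepA (PySem.Dict.mk day_data)) (List.replicate 48 "ok") := by
  unfold day_slots_to_48_py stepA
  rfl

theorem portB_eq (day_data : List (String × Int)) :
    day_slots_to_48_py_alt day_data = day_data.foldl stepB (List.replicate 48 "ok") := by
  unfold day_slots_to_48_py_alt stepB
  rfl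

theorem length_stepA (d : PySem.Dict String Int) (g : List String) (i : Int) :
    (stepA d g i).length = g.length := by
  unfold stepA; split_ifs <;> simp [PySem.List.length_pySetD]

theorem length_stepB (g : List String) (kv : String × Int) :
    (stepB g kv).length = g.length := by
  unfold stepB
  rcases slotDict.get? kv.1 with _ | i <;> rcases statusDict.get? kv.2 with _ | st <;>
    simp [PySem.List.length_pySetD]

theorem length_foldA (d : PySem.Dict String Int) (l : List Int) (g : List String) :
    (l.foldl (stepA d) g).length = g.length := by
  induction l generalizing g with
  | nil => rfl
  | cons x xs ih => simp [List.foldl_cons, ih, length_stepA]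

theorem length_foldB (l : List (String × Int)) (g : List String) :
    (l.foldl stepB g).length = g.length := by
  induction l generalizing g with
  | nil => rfl
  | cons x xs ih => simp [List.foldl_cons, ih, length_stepB]

-- decided facts about the closed tables
set_option maxRecDepth 10000 in
theorem slot_get_label : ∀ j ∈ List.range 48, slotDict.get? (labelA j) = some (j : Int) := by decide

set_option maxRecDepth 10000 in
theorem slot_items_spec : ∀ p ∈ slotDict.items, labelA p.2 = p.1 ∧ 0 ≤ p.2 ∧ p.2 < 48 := by decide

theorem status_get (v : Int) :
    statusDict.get? v = if v = 3 then some "off" else if v = 2 then some "maybe" else none := by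
  split_ifs with h3 h2
  · subst h3; decide
  · subst h2; decide
  · have hk : statusDict.keys = [3, 2] := by decide
    rw [PySem.Dict.get?_eq_none_iff_not_mem_keys, hk]
    simp [h3, h2]

theorem slot_get_spec (k : String) (i : Int) (h : slotDict.get? k = some i) :
    labelA i = k ∧ 0 ≤ i ∧ i < 48 := by
  exact slot_items_spec _ (PySem.Dict.mem_items_of_get?_eq_some slotDict h)

-- A's step at the slot it writes, and at any other slot
theorem stepA_getElem?_self (d : PySem.Dict String Int) (g : List String) (m : Nat)
    (hm : m < g.length) :
    (stepA d g (m : Int))[m]? =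
      if d.getD (labelA m) 1 = 3 then some "off"
      else if d.getD (labelA m) 1 = 2 then some "maybe" else g[m]? := by
  unfold stepA
  split_ifs <;> simp [PySem.List.pySetD_natCast, List.getElem?_set_self hm]

theorem stepA_getElem?_ne (d : PySem.Dict String Int) (g : List String) (m j : Nat) (hmj : m ≠ j) :
    (stepA d g (m : Int))[j]? = g[j]? := by
  unfold stepA
  split_ifs <;> simp [PySem.List.pySetD_natCast, List.getElem?_set_ne hmj]

-- characterisation of A's loop
theorem foldA_getElem? (d : PySem.Dict String Int) (n : Nat) (hn : n ≤ 48)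
    (g : List String) (hg : g.length = 48) (j : Nat) (hj : j < 48) :
    ((PySem.List.pyRange 0 (n : Int) 1).foldl (stepA d) g)[j]? =
      if j < n then
        (if d.getD (labelA j) 1 = 3 then some "off"
         else if d.getD (labelA j) 1 = 2 then some "maybe" else g[j]?)
      else g[j]? := by
  induction n with
  | zero => simp
  | succ m ih =>
    have hm : m ≤ 48 := by omega
    rw [show ((m + 1 : Nat) : Int) = (m : Int) + 1 by push_cast; ring,
        PySem.List.pyRange_one_succ_right (by positivity), List.foldl_append,
        List.foldl_cons, List.foldl_nil]
    have hGlen : ((PySem.List.pyRange 0 (m : Int) 1).foldl (stepA d) g).length = 48 := by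
      rw [length_foldA, hg]
    have hGj := ih hm
    by_cases hjm : j = m
    · subst hjm
      rw [stepA_getElem?_self d _ j (by omega), hGj]
      simp [show j < j + 1 by omega]
    · rw [stepA_getElem?_ne d _ m j (by omega), hGj]
      by_cases hlt : j < m
      · simp [hlt, show j < m + 1 by omega]
      · simp [hlt, show ¬ j < m + 1 by omega]

-- characterisation of B's loop (first-match lookup, under distinct keys)
theorem foldB_getElem? (l : List (String × Int)) (hnd : (l.map Prod.fst).Nodup)
    (g : List String) (hg : g.length = 48) (j : Nat) (hj : j < 48) :
    (l.foldl stepB g)[j]? =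
      match (PySem.Dict.mk l).get? (labelA j) with
      | none => g[j]?
      | some v => if v = 3 then some "off" else if v = 2 then some "maybe" else g[j]? := by
  induction l generalizing g with
  | nil => rfl
  | cons kv rest ih =>
    obtain ⟨k, v⟩ := kv
    have hnd' : (rest.map Prod.fst).Nodup := (List.nodup_cons.mp hnd).2
    have hknotin : k ∉ rest.map Prod.fst := (List.nodup_cons.mp hnd).1
    rw [List.foldl_cons, PySem.Dict.get?_mk_cons]
    by_cases hk : k = labelA j
    · have hrest_none : (PySem.Dict.mk rest).get? (labelA j) = none := by
        rw [PySem.Dict.get?_eq_none_iff_not_mem_keys, PySem.Dict.keys_mk]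
        rw [hk] at hknotin; exact hknotin
      have hslot : slotDict.get? k = some (j : Int) := by
        rw [hk]; exact slot_get_label j (List.mem_range.mpr hj)
      rw [if_pos (by simp [hk])]
      by_cases h3 : v = 3
      · have hstep : stepB g (k, v) = g.set j "off" := by
          simp [stepB, hslot, status_get, h3, PySem.List.pySetD_natCast]
        have hih := ih hnd' (g.set j "off") (by simp [hg])
        rw [hstep, hih, hrest_none]
        show (g.set j "off")[j]? = if v = 3 then some "off" else _
        rw [if_pos h3, List.getElem?_set_self (by omega)]
      · by_cases h2 : v = 2
        · have hstep : stepB g (k, v) = g.set j "maybe" := by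
            simp [stepB, hslot, status_get, h2, PySem.List.pySetD_natCast]
          have hih := ih hnd' (g.set j "maybe") (by simp [hg])
          rw [hstep, hih, hrest_none]
          show (g.set j "maybe")[j]? = if v = 3 then some "off" else if v = 2 then some "maybe" else _
          rw [if_neg h3, if_pos h2, List.getElem?_set_self (by omega)]
        · have hstep : stepB g (k, v) = g := by
            simp [stepB, hslot, status_get, h3, h2]
          rw [hstep, ih hnd' g hg, hrest_none]
          show g[j]? = if v = 3 then some "off" else if v = 2 then some "maybe" else g[j]?
          rw [if_neg h3, if_neg h2]
    · rw [if_neg (by simp [hk])]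
      have hstep : (stepB g (k, v))[j]? = g[j]? ∧ (stepB g (k, v)).length = 48 := by
        unfold stepB
        cases hsl : slotDict.get? k with
        | none => exact ⟨rfl, hg⟩
        | some i =>
          obtain ⟨hlab, hi0, hi48⟩ := slot_get_spec k i hsl
          have hij : i.toNat ≠ j := by
            intro he
            exact hk (by rw [← hlab]; congr 1; omega)
          cases hst : statusDict.get? v with
          | none => exact ⟨rfl, hg⟩
          | some st =>
            refine ⟨?_, ?_⟩
            · show (PySem.List.pySetD g i st)[j]? = g[j]?
              rw [PySem.List.pySetD_of_nonneg g st hi0, List.getElem?_set_ne hij]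
            · show (PySem.List.pySetD g i st).length = 48
              rw [PySem.List.pySetD_of_nonneg g st hi0, List.length_set, hg]
      rw [ih hnd' _ hstep.2]
      cases hrest : (PySem.Dict.mk rest).get? (labelA j) with
      | none => exact hstep.1
      | some v' =>
        show (if v' = 3 then some "off" else if v' = 2 then some "maybe" else (stepB g (k, v))[j]?)
          = if v' = 3 then some "off" else if v' = 2 then some "maybe" else g[j]?
        split_ifs with h3 h2
        · rfl
        · rfl
        · exact hstep.1

-- ===== VERDICT (by name: the statement is the Claim_ definition above) =====
theorem day_slots_to_48_py_spec : Claim_equal_day_slots_to_48_py := by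
  intro day_data _hdom hpre
  unfold Spec_day_slots_to_48_py
  rw [portA_eq, portB_eq]
  have hlenA : ((PySem.List.pyRange 0 48 1).foldl (stepA (PySem.Dict.mk day_data)) (List.replicate 48 "ok")).length = 48 := by
    rw [length_foldA]; simp
  have hlenB : (day_data.foldl stepB (List.replicate 48 "ok")).length = 48 := by
    rw [length_foldB]; simp
  apply List.ext_getElem?
  intro j
  by_cases hj : j < 48
  · rw [show (48 : Int) = ((48 : Nat) : Int) by norm_num,
        foldA_getElem? (PySem.Dict.mk day_data) 48 le_rfl _ (by simp) j hj,
        foldB_getElem? day_data hpre _ (by simp) j hj]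
    rw [PySem.Dict.getD_eq_get?_getD]
    cases hlook : (PySem.Dict.mk day_data).get? (labelA j) with
    | none => simp [hj]
    | some v =>
      simp only [Option.getD_some, if_pos hj]
      by_cases h3 : v = 3
      · simp [h3]
      · by_cases h2 : v = 2 <;> simp [h3, h2]
  · rw [List.getElem?_eq_none (by rw [hlenA]; omega),
        List.getElem?_eq_none (by rw [hlenB]; omega)]
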